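-- pv_equiv track=rewrite | github.com/kwonjuyeong/Baekjoon_CodingTest | 프로그래머스/0/120956. 옹알이 （1）/옹알이 （1）.py | solution
-- ===== SOURCE A (Python) =====
-- def solution(babbling):
--     answer = 0
--     zoca = ["aya", "ye", "woo", "ma"]
--
--     for i in range(len(babbling)):
--         cnt = 0
--         keyword = ""
--         for j in babbling[i]:
--             keyword += j
--             if keyword in zoca:
--                 keyword = ""
--                 cnt += 1
--         if len(keyword) == 0 and cnt != 0:
--             answer += 1
--
--     return answer
-- ===== SOURCE B (Python) =====
-- ZOCA = ("aya", "ye", "woo", "ma")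
--
--
-- def _ok(w):
--     while w:
--         for z in ZOCA:
--             if w.startswith(z):
--                 w = w[len(z):]
--                 break
--         else:
--             return False
--     return True
--
--
-- def solution(babbling):
--     return sum(1 for w in babbling if w and _ok(w))
-- ===== Notes on version B (the rewrite author's own statement) =====
-- stated objective: idiomatic
-- what changed: Per-word char-by-char greedy keyword accumulation with a counter is replaced by a fragment-prefix-stripping loop (startswith over the fragment tuple) plus a non-empty guard, and the outer counting loop by a sum over a generator.
import Mathlib
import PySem

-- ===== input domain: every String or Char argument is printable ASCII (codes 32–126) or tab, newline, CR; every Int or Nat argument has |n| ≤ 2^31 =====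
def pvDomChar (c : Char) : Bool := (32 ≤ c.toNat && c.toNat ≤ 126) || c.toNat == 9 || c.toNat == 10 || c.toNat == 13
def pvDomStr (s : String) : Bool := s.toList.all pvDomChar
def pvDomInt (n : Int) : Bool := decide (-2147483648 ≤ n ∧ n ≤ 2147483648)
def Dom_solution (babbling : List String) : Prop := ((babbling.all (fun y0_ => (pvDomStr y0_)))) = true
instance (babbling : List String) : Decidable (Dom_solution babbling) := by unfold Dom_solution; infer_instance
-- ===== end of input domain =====

-- B replaces A's char-by-char greedy keyword accumulation with per-word fragment-prefix stripping (idiomatic; same cost).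

-- ===== PORT A =====
-- keyword strings are modelled as their character lists; `keyword += j` is `kw ++ [j]`,
-- `keyword in zoca` is membership among the four fragment character lists.
def zocaA : List (List Char) := [['a','y','a'], ['y','e'], ['w','o','o'], ['m','a']]

def stepA (st : List Char × Int) (c : Char) : List Char × Int :=
  let kw := st.1 ++ [c]
  if kw ∈ zocaA then ([], st.2 + 1) else (kw, st.2)

def solution (babbling : List String) : Int :=
  babbling.foldl
    (fun answer w =>
      let r := w.toList.foldl stepA ([], 0)
      if r.1.length = 0 ∧ r.2 ≠ 0 then answer + 1 else answer)
    0

-- ===== PORT B =====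
-- `_ok`: the while-loop stripping one fragment prefix per iteration, as a recursion
-- on the remaining suffix; the four `startswith` tests in ZOCA order, `else: False`.
def okB : List Char → Bool
  | [] => true
  | 'a' :: 'y' :: 'a' :: r => okB r
  | 'y' :: 'e' :: r => okB r
  | 'w' :: 'o' :: 'o' :: r => okB r
  | 'm' :: 'a' :: r => okB r
  | _ => false

def solution_alt (babbling : List String) : Int :=
  (babbling.countP (fun w => decide (w ≠ "") && okB w.toList) : Int)

-- ===== PRECONDITION & SPEC =====
def Spec_solution (babbling : List String) (out : Int) : Prop := out = solution_alt babbling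
instance (babbling : List String) (out : Int) : Decidable (Spec_solution babbling out) := by unfold Spec_solution; infer_instance

-- ===== CLAIM (what is proved, stated in full; the proofs are below) =====
def Claim_equal_solution : Prop := ∀ (babbling : List String), Dom_solution babbling → Spec_solution babbling (solution babbling)

-- ===== LEMMAS AND PROOFS =====

-- the counter never decreases
theorem stepA_mono (l : List Char) (kw : List Char) (c0 : Int) :
    c0 ≤ (l.foldl stepA (kw, c0)).2 := by
  induction l generalizing kw c0 with
  | nil => simp
  | cons c t ih =>
      simp only [List.foldl_cons, stepA]
      split
      · exact le_trans (by omega) (ih [] (c0 + 1))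
      · exact ih _ c0

-- once the keyword is nonempty and is not a prefix of any fragment, it never empties again
theorem stepA_stuck (l : List Char) (kw : List Char) (c0 : Int)
    (hne : kw ≠ []) (hnp : ∀ z ∈ zocaA, ¬ kw <+: z) :
    (l.foldl stepA (kw, c0)).1 ≠ [] := by
  induction l generalizing kw c0 with
  | nil => simpa using hne
  | cons c t ih =>
      simp only [List.foldl_cons, stepA]
      have hpre : kw <+: kw ++ [c] := ⟨[c], rfl⟩
      have hnotmem : kw ++ [c] ∉ zocaA := fun hm => hnp _ hm hpre
      rw [if_neg hnotmem]
      exact ih (kw ++ [c]) c0 (by simp) (fun z hz hp => hnp z hz (hpre.trans hp))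

-- if okB accepts, the fold empties the keyword, counting at least one tile on a nonempty word
theorem okB_sound (l : List Char) (c0 : Int) (h : okB l = true) :
    (l.foldl stepA ([], c0)).1 = [] ∧ (l ≠ [] → c0 + 1 ≤ (l.foldl stepA ([], c0)).2) := by
  induction l using okB.induct generalizing c0 with
  | case1 => simp
  | case2 r ih =>
      simp only [okB] at h
      have hred : (('a'::'y'::'a'::r).foldl stepA ([], c0)) = r.foldl stepA ([], c0 + 1) := by
        simp [stepA, zocaA]
      rw [hred]
      exact ⟨(ih (c0 + 1) h).1, fun _ => stepA_mono r [] (c0 + 1)⟩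
  | case3 r ih =>
      simp only [okB] at h
      have hred : (('y'::'e'::r).foldl stepA ([], c0)) = r.foldl stepA ([], c0 + 1) := by
        simp [stepA, zocaA]
      rw [hred]
      exact ⟨(ih (c0 + 1) h).1, fun _ => stepA_mono r [] (c0 + 1)⟩
  | case4 r ih =>
      simp only [okB] at h
      have hred : (('w'::'o'::'o'::r).foldl stepA ([], c0)) = r.foldl stepA ([], c0 + 1) := by
        simp [stepA, zocaA]
      rw [hred]
      exact ⟨(ih (c0 + 1) h).1, fun _ => stepA_mono r [] (c0 + 1)⟩
  | case5 r ih =>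
      simp only [okB] at h
      have hred : (('m'::'a'::r).foldl stepA ([], c0)) = r.foldl stepA ([], c0 + 1) := by
        simp [stepA, zocaA]
      rw [hred]
      exact ⟨(ih (c0 + 1) h).1, fun _ => stepA_mono r [] (c0 + 1)⟩
  | case6 t h1 h2 h3 h4 h5 =>
      exfalso
      rw [okB.eq_def] at h
      split at h
      · exact h1 rfl
      · exact h2 _ rfl
      · exact h3 _ rfl
      · exact h4 _ rfl
      · exact h5 _ rfl
      · exact Bool.false_ne_true h

-- if okB rejects, the keyword is nonempty at the end of the fold
theorem okB_complete (l : List Char) (c0 : Int) (h : okB l = false) :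
    (l.foldl stepA ([], c0)).1 ≠ [] := by
  induction l using okB.induct generalizing c0 with
  | case1 => simp [okB] at h
  | case2 r ih =>
      simp only [okB] at h
      have hred : (('a'::'y'::'a'::r).foldl stepA ([], c0)) = r.foldl stepA ([], c0 + 1) := by
        simp [stepA, zocaA]
      rw [hred]; exact ih (c0 + 1) h
  | case3 r ih =>
      simp only [okB] at h
      have hred : (('y'::'e'::r).foldl stepA ([], c0)) = r.foldl stepA ([], c0 + 1) := by
        simp [stepA, zocaA]
      rw [hred]; exact ih (c0 + 1) h
  | case4 r ih =>
      simp only [okB] at h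
      have hred : (('w'::'o'::'o'::r).foldl stepA ([], c0)) = r.foldl stepA ([], c0 + 1) := by
        simp [stepA, zocaA]
      rw [hred]; exact ih (c0 + 1) h
  | case5 r ih =>
      simp only [okB] at h
      have hred : (('m'::'a'::r).foldl stepA ([], c0)) = r.foldl stepA ([], c0 + 1) := by
        simp [stepA, zocaA]
      rw [hred]; exact ih (c0 + 1) h
  | case6 t h1 h2 h3 h4 h5 =>
      rcases t with _ | ⟨c, rest⟩
      · exact absurd rfl h1
      by_cases ha : c = 'a'
      · subst ha
        rcases rest with _ | ⟨c2, r2⟩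
        · simp [stepA, zocaA]
        by_cases hy : c2 = 'y'
        · subst hy
          rcases r2 with _ | ⟨c3, r3⟩
          · simp [stepA, zocaA]
          have hc3 : c3 ≠ 'a' := fun hh => h2 r3 (by rw [hh])
          have hred : (('a'::'y'::c3::r3).foldl stepA ([], c0))
              = r3.foldl stepA (['a','y',c3], c0) := by
            simp [stepA, zocaA, hc3]
          rw [hred]
          refine stepA_stuck r3 _ c0 (by simp) ?_
          intro z hz hp
          fin_cases hz <;> simp_all [List.cons_prefix_cons]
        · have hred : (('a'::c2::r2).foldl stepA ([], c0))
              = r2.foldl stepA (['a',c2], c0) := by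
            simp [stepA, zocaA, hy]
          rw [hred]
          refine stepA_stuck r2 _ c0 (by simp) ?_
          intro z hz hp
          fin_cases hz <;> simp_all [List.cons_prefix_cons]
      by_cases hyc : c = 'y'
      · subst hyc
        rcases rest with _ | ⟨c2, r2⟩
        · simp [stepA, zocaA]
        have hc2 : c2 ≠ 'e' := fun hh => h3 r2 (by rw [hh])
        have hred : (('y'::c2::r2).foldl stepA ([], c0))
            = r2.foldl stepA (['y',c2], c0) := by
          simp [stepA, zocaA, hc2]
        rw [hred]
        refine stepA_stuck r2 _ c0 (by simp) ?_
        intro z hz hp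
        fin_cases hz <;> simp_all [List.cons_prefix_cons]
      by_cases hw : c = 'w'
      · subst hw
        rcases rest with _ | ⟨c2, r2⟩
        · simp [stepA, zocaA]
        by_cases ho : c2 = 'o'
        · subst ho
          rcases r2 with _ | ⟨c3, r3⟩
          · simp [stepA, zocaA]
          have hc3 : c3 ≠ 'o' := fun hh => h4 r3 (by rw [hh])
          have hred : (('w'::'o'::c3::r3).foldl stepA ([], c0))
              = r3.foldl stepA (['w','o',c3], c0) := by
            simp [stepA, zocaA, hc3]
          rw [hred]
          refine stepA_stuck r3 _ c0 (by simp) ?_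
          intro z hz hp
          fin_cases hz <;> simp_all [List.cons_prefix_cons]
        · have hred : (('w'::c2::r2).foldl stepA ([], c0))
              = r2.foldl stepA (['w',c2], c0) := by
            simp [stepA, zocaA, ho]
          rw [hred]
          refine stepA_stuck r2 _ c0 (by simp) ?_
          intro z hz hp
          fin_cases hz <;> simp_all [List.cons_prefix_cons]
      by_cases hm : c = 'm'
      · subst hm
        rcases rest with _ | ⟨c2, r2⟩
        · simp [stepA, zocaA]
        have hc2 : c2 ≠ 'a' := fun hh => h5 r2 (by rw [hh])
        have hred : (('m'::c2::r2).foldl stepA ([], c0))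
            = r2.foldl stepA (['m',c2], c0) := by
          simp [stepA, zocaA, hc2]
        rw [hred]
        refine stepA_stuck r2 _ c0 (by simp) ?_
        intro z hz hp
        fin_cases hz <;> simp_all [List.cons_prefix_cons]
      · have hred : ((c::rest).foldl stepA ([], c0)) = rest.foldl stepA ([c], c0) := by
          simp [stepA, zocaA, ha, hyc, hw, hm]
        rw [hred]
        refine stepA_stuck rest _ c0 (by simp) ?_
        intro z hz hp
        fin_cases hz <;> simp_all [List.cons_prefix_cons]

-- A counts a word exactly when it is nonempty and okB accepts it
theorem count_iff (w : String) :
    ((w.toList.foldl stepA ([], 0)).1.length = 0 ∧ (w.toList.foldl stepA ([], 0)).2 ≠ 0) ↔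
      (w ≠ "" ∧ okB w.toList = true) := by
  have hnil : w.toList = [] ↔ w = "" := String.toList_eq_nil_iff
  cases hok : okB w.toList with
  | false =>
      have := okB_complete w.toList 0 hok
      simp only [List.length_eq_zero_iff]
      exact ⟨fun hc => absurd hc.1 this, fun hc => absurd hc.2 (by simp)⟩
  | true =>
      have hs := okB_sound w.toList 0 hok
      by_cases hw : w = ""
      · subst hw
        simp
      · have hl : w.toList ≠ [] := fun hh => hw (hnil.mp hh)
        have h2 := hs.2 hl
        simp only [List.length_eq_zero_iff]
        exact ⟨fun _ => ⟨hw, by trivial⟩, fun _ => ⟨hs.1, by omega⟩⟩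

-- the outer accumulation is a count
theorem outer_count (xs : List String) (a : Int) :
    (xs.foldl
      (fun answer w =>
        let r := w.toList.foldl stepA ([], 0)
        if r.1.length = 0 ∧ r.2 ≠ 0 then answer + 1 else answer)
      a)
    = a + (xs.countP (fun w => decide (w ≠ "") && okB w.toList) : Int) := by
  induction xs generalizing a with
  | nil => simp
  | cons w t ih =>
      simp only [List.foldl_cons, List.countP_cons]
      rw [ih]
      by_cases h : (w ≠ "" ∧ okB w.toList = true)
      · rw [if_pos ((count_iff w).mpr h)]
        simp [h.1, h.2]
        omega
      · rw [if_neg (fun hc => h ((count_iff w).mp hc))]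
        have hb : ¬ ((decide (w ≠ "") && okB w.toList) = true) := by
          simp only [Bool.and_eq_true, decide_eq_true_eq]
          exact fun hc => h ⟨hc.1, hc.2⟩
        simp
        intro hne
        cases hq : okB w.toList
        · rfl
        · exact absurd ⟨hne, hq⟩ h

-- ===== VERDICT (by name: the statement is the Claim_ definition above) =====
theorem solution_spec : Claim_equal_solution := by
  intro babbling _
  show solution babbling = solution_alt babbling
  unfold solution solution_alt
  rw [outer_count]
  simp
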